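-- pv_equiv track=rewrite | github.com/ScPlaceholder/SC-Toolbox-Beta-V2 | tools/Mining_Signals/ocr/refinery_reader.py | _regions_to_rows
-- ===== SOURCE A (Python) =====
-- def _regions_to_rows(regions: list[dict]) -> list[list[dict]]:
--     """Group text regions into rows by y_mid proximity (20px threshold)."""
--     sorted_regions = sorted(regions, key=lambda r: r.get("y_mid", 0))
--     rows: list[list[dict]] = []
--     current_row: list[dict] = []
--     last_y = -100
--     for r in sorted_regions:
--         y = r.get("y_mid", 0)
--         if abs(y - last_y) > 20 and current_row:
--             rows.append(current_row)
--             current_row = []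
--         current_row.append(r)
--         last_y = y
--     if current_row:
--         rows.append(current_row)
--     return rows
-- ===== SOURCE B (Python) =====
-- def _regions_to_rows(regions: list[dict]) -> list[list[dict]]:
--     """Group text regions into rows: find maximal runs of y_mid-consecutive
--     regions (gap <= 20px) in the sorted order and slice them out."""
--     srt = sorted(regions, key=lambda r: r.get("y_mid", 0))
--     rows: list[list[dict]] = []
--     i, n = 0, len(srt)
--     while i < n:
--         j = i + 1
--         while j < n and srt[j].get("y_mid", 0) - srt[j - 1].get("y_mid", 0) <= 20:
--             j += 1
--         rows.append(srt[i:j])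
--         i = j
--     return rows
-- ===== Notes on version B (the rewrite author's own statement) =====
-- stated objective: alternative
-- what changed: Replaces A's single fold carrying (rows, current_row, last_y) with flush-on-gap logic by a run-finding decomposition: an inner scan extends each row to its maximal gap<=20 run of the sorted list and the row is emitted as one slice, so no accumulator row or sentinel last_y=-100 is maintained.
import Mathlib
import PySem

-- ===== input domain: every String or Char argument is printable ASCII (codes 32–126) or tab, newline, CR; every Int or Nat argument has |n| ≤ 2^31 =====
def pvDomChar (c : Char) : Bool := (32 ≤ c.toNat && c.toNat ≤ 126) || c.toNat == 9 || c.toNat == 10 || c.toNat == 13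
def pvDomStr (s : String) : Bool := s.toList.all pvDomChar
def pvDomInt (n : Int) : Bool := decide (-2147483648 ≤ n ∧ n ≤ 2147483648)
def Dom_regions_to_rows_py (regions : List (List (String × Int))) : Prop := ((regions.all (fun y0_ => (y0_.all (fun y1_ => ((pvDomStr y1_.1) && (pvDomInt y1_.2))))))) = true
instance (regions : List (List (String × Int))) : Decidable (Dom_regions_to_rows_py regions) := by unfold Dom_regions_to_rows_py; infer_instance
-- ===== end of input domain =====

-- B replaces A's fold carrying (rows, current_row, last_y) by a run-finding
-- decomposition (each row is a maximal gap≤20 run of the sorted list); same cost.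

-- r.get("y_mid", 0) on the association-list encoding of the dict (first match, default 0)
def pvGetY (r : List (String × Int)) : Int :=
  (((r.find? (fun p => p.1 == "y_mid")).map Prod.snd).getD 0)

-- ===== PORT A =====
def regions_to_rows_py (regions : List (List (String × Int))) : List (List (List (String × Int))) :=
  let sortedRegions := PySem.List.sorted regions (fun r => pvGetY r)
  let st := sortedRegions.foldl
    (fun (s : List (List (List (String × Int))) × List (List (String × Int)) × Int) r =>
      let y := pvGetY r
      if 20 < |y - s.2.2| ∧ s.2.1 ≠ [] then (s.1 ++ [s.2.1], [r], y)
      else (s.1, s.2.1 ++ [r], y))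
    ([], [], -100)
  if st.2.1 ≠ [] then st.1 ++ [st.2.1] else st.1

-- ===== PORT B =====
-- inner while loop: extend the current run while the consecutive gap is ≤ 20;
-- returns (rest of the run after its first element, remaining suffix)
def pvTakeRun (last : Int) : List (List (String × Int)) → List (List (String × Int)) × List (List (String × Int))
  | [] => ([], [])
  | z :: zs =>
    if pvGetY z - last ≤ 20 then
      let p := pvTakeRun (pvGetY z) zs
      (z :: p.1, p.2)
    else ([], z :: zs)

theorem pvTakeRun_rest_length (last : Int) (zs : List (List (String × Int))) :
    (pvTakeRun last zs).2.length ≤ zs.length := by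
  induction zs generalizing last with
  | nil => simp [pvTakeRun]
  | cons z zs ih =>
    simp only [pvTakeRun]
    split
    · exact le_trans (ih _) (Nat.le_succ _)
    · simp

-- outer while loop: slice out one maximal run per iteration
def pvChunkRows : List (List (String × Int)) → List (List (List (String × Int)))
  | [] => []
  | x :: rest =>
    let p := pvTakeRun (pvGetY x) rest
    (x :: p.1) :: pvChunkRows p.2
termination_by xs => xs.length
decreasing_by
  have := pvTakeRun_rest_length (pvGetY x) rest
  simp only [List.length_cons]
  omega

def regions_to_rows_py_alt (regions : List (List (String × Int))) : List (List (List (String × Int))) :=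
  pvChunkRows (PySem.List.sorted regions (fun r => pvGetY r))

-- ===== PRECONDITION & SPEC =====
def Spec_regions_to_rows_py (regions : List (List (String × Int))) (out : List (List (List (String × Int)))) : Prop := out = regions_to_rows_py_alt regions
instance (regions : List (List (String × Int))) (out : List (List (List (String × Int)))) : Decidable (Spec_regions_to_rows_py regions out) := by unfold Spec_regions_to_rows_py; infer_instance

-- ===== CLAIM (what is proved, stated in full; the proofs are below) =====
def Claim_equal_regions_to_rows_py : Prop := ∀ (regions : List (List (String × Int))), Dom_regions_to_rows_py regions → Spec_regions_to_rows_py regions (regions_to_rows_py regions)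

-- ===== LEMMAS AND PROOFS =====

theorem pvChunkRows_nil : pvChunkRows [] = [] := by rw [pvChunkRows]

theorem pvChunkRows_cons (x : List (String × Int)) (rest : List (List (String × Int))) :
    pvChunkRows (x :: rest)
      = (x :: (pvTakeRun (pvGetY x) rest).1) :: pvChunkRows (pvTakeRun (pvGetY x) rest).2 := by
  rw [pvChunkRows]

-- A's loop step, named for the proofs
def pvStepA (s : List (List (List (String × Int))) × List (List (String × Int)) × Int)
    (r : List (String × Int)) :
    List (List (List (String × Int))) × List (List (String × Int)) × Int :=
  let y := pvGetY r
  if 20 < |y - s.2.2| ∧ s.2.1 ≠ [] then (s.1 ++ [s.2.1], [r], y)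
  else (s.1, s.2.1 ++ [r], y)

-- invariant: once current_row is nonempty and the remaining keys chain up from last_y,
-- A's fold + final flush produces exactly rows ++ the runs B slices out
theorem pvFoldA_eq (xs : List (List (String × Int))) :
    ∀ (rows : List (List (List (String × Int)))) (cur : List (List (String × Int))) (last : Int),
    cur ≠ [] → List.IsChain (· ≤ ·) (last :: xs.map pvGetY) →
    (let st := xs.foldl pvStepA (rows, cur, last)
     if st.2.1 ≠ [] then st.1 ++ [st.2.1] else st.1)
    = rows ++ (cur ++ (pvTakeRun last xs).1) :: pvChunkRows (pvTakeRun last xs).2 := by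
  induction xs with
  | nil =>
    intro rows cur last hcur _
    simp [pvTakeRun, pvChunkRows_nil, hcur]
  | cons x xs ih =>
    intro rows cur last hcur hch
    have h1 : last ≤ pvGetY x := (List.isChain_cons.mp hch).1 (pvGetY x) (by simp)
    have h2 : List.IsChain (· ≤ ·) (pvGetY x :: xs.map pvGetY) := by
      have := (List.isChain_cons.mp hch).2
      simpa using this
    have habs : |pvGetY x - last| = pvGetY x - last := abs_of_nonneg (by omega)
    by_cases hgap : pvGetY x - last ≤ 20
    · have hcond : ¬ (20 < |pvGetY x - last| ∧ cur ≠ []) := by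
        rw [habs]; intro h; omega
      have hstep : pvStepA (rows, cur, last) x = (rows, cur ++ [x], pvGetY x) := by
        simp only [pvStepA]; rw [if_neg hcond]
      simp only [List.foldl_cons, hstep]
      rw [ih rows (cur ++ [x]) (pvGetY x) (by simp) h2]
      simp only [pvTakeRun, if_pos hgap]
      simp
    · have hcond : (20 < |pvGetY x - last| ∧ cur ≠ []) := by
        rw [habs]; exact ⟨by omega, hcur⟩
      have hstep : pvStepA (rows, cur, last) x = (rows ++ [cur], [x], pvGetY x) := by
        simp only [pvStepA]; rw [if_pos hcond]
      simp only [List.foldl_cons, hstep]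
      rw [ih (rows ++ [cur]) [x] (pvGetY x) (by simp) h2]
      simp only [pvTakeRun, if_neg hgap]
      rw [pvChunkRows_cons]
      simp

theorem pvChain_sorted (regions : List (List (String × Int))) :
    List.IsChain (fun a b => pvGetY a ≤ pvGetY b) (PySem.List.sorted regions (fun r => pvGetY r)) := by
  exact List.Pairwise.isChain (PySem.List.sorted_pairwise regions (fun r => pvGetY r))

-- ===== VERDICT (by name: the statement is the Claim_ definition above) =====
theorem regions_to_rows_py_spec : Claim_equal_regions_to_rows_py := by
  intro regions _
  unfold Spec_regions_to_rows_py regions_to_rows_py regions_to_rows_py_alt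
  have hch := pvChain_sorted regions
  cases hS : PySem.List.sorted regions (fun r => pvGetY r) with
  | nil => simp [pvChunkRows_nil]
  | cons x xs =>
    rw [hS] at hch
    have h2 : List.IsChain (· ≤ ·) (pvGetY x :: xs.map pvGetY) := by
      simpa using List.isChain_map_of_isChain pvGetY (fun a b h => h) hch
    have hfirst :
        pvStepA (([], [], -100) :
          List (List (List (String × Int))) × List (List (String × Int)) × Int) x
          = ([], [x], pvGetY x) := by
      simp [pvStepA]
    have := pvFoldA_eq xs [] [x] (pvGetY x) (by simp) h2
    simp only [List.foldl_cons]
    show (let st := xs.foldl pvStepA (pvStepA ([], [], -100) x);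
          if st.2.1 ≠ [] then st.1 ++ [st.2.1] else st.1) = pvChunkRows (x :: xs)
    rw [hfirst, this, pvChunkRows_cons]
    simp
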